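-- pv_equiv track=rewrite | github.com/mohamadsolkhannawawi/informatics-practicum-portfolio | Semester-1/Programming-Fundamentals/07-Programming-Fundamentals/testhackerrank.py | DescendingSortUnique
-- ===== SOURCE A (Python) =====
-- def Konso(e,L):
--     if L == []:
--         return [e]
--     else:
--         return [e] + L
--
-- def IsEmpty(S):
--     return ( S == [])
--
-- def FirstElement(L):
--     if L == [] :
--         return None
--     else:
--         return L[0]
--
-- def Tail(L):
--     if L == []:
--         return []
--     else:
--         return L[1:]
--
-- def IsOneElmt(L):
--     return Tail(L) == []
--
-- def IsMember(X,L):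
--     if IsEmpty(L):
--         return False
--     elif X == FirstElement(L):
--         return True
--     else:
--         return IsMember(X,Tail(L))
--
-- def Max(a,b):
--     if a >= b :
--         return a
--     else:
--         return b
--
-- def IsAtom(S):
--     if isinstance(S, (int, float, str, bytes, bool, type(None))):
--         return True
--     else:
--         return False
--
-- def FirstList(S):
--     if S == [] :
--         return None
--     else:
--         return S[0]
--
-- def TailList(S):
--     if S == [] :
--         return None
--     else:
--         return S[1:]
--
-- def maxList(S):
--     if IsOneElmt(S):
--         if IsAtom(FirstList(S)):
--             return FirstList(S)
--         else:
--             return maxList(FirstList(S))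
--     else:
--         if IsAtom(FirstList(S)):
--             return Max(FirstList(S),maxList(TailList(S)))
--         else:
--             return Max(FirstList(S),maxList(TailList(S)))
--
-- def DescendingSortUnique(L):
--     if IsEmpty(L) :
--         return []
--     else:
--         if IsMember(maxList(L),Tail(L)) :
--             return DescendingSortUnique(Tail(L))
--         else:
--             return Konso(maxList(L),DescendingSortUnique(Tail(L)))
-- ===== SOURCE B (Python) =====
-- def DescendingSortUnique(L):
--     # One right-to-left pass: keep elements strictly greater than the running
--     # maximum of the suffix already seen, then restore original order.
--     res = []
--     m = None
--     for x in reversed(L):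
--         if m is None or x > m:
--             res.append(x)
--             m = x
--     res.reverse()
--     return res
-- ===== Notes on version B (the rewrite author's own statement) =====
-- stated objective: faster
-- what changed: Replaces the recursive scheme that recomputes maxList and an IsMember scan at every step with a single right-to-left pass keeping a running suffix maximum.
import Mathlib
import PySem

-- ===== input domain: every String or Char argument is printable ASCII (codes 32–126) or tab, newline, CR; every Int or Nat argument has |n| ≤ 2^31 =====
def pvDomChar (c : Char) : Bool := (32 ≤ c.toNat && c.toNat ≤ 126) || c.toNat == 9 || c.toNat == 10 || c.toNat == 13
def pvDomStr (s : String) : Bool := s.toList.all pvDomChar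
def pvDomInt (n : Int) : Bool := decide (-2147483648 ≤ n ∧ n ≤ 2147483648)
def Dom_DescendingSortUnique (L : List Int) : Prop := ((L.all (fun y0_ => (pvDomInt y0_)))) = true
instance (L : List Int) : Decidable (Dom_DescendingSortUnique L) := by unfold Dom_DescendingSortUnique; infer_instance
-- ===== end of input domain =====

-- B replaces A's quadratic recursion (maxList + IsMember rescans at every step)
-- with one right-to-left pass keeping a running suffix maximum; return values proved equal.


-- ===== PORT A =====
-- def IsMember(X,L): recursion on the list, first-element comparison
def pvIsMember (x : Int) : List Int → Bool
  | [] => false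
  | y :: ys => if x = y then true else pvIsMember x ys

-- def Max(a,b)
def pvMax (a b : Int) : Int := if a ≥ b then a else b

-- def maxList(S) on flat int lists (IsAtom is always true on Dom);
-- the [] case is unreachable in A (Python would return None there)
def pvMaxList : List Int → Int
  | [] => 0
  | [x] => x
  | x :: y :: ys => pvMax x (pvMaxList (y :: ys))

def DescendingSortUnique : List Int → List Int
  | [] => []
  | x :: xs =>
      if pvIsMember (pvMaxList (x :: xs)) xs then DescendingSortUnique xs
      else pvMaxList (x :: xs) :: DescendingSortUnique xs   -- Konso

-- ===== PORT B =====
-- the loop body of Source B (state: res built back-to-front order of traversal, running max m)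
def pvStep (acc : List Int × Option Int) (x : Int) : List Int × Option Int :=
  match acc.2 with
  | none => (acc.1 ++ [x], some x)
  | some m => if x > m then (acc.1 ++ [x], some x) else acc

def DescendingSortUnique_alt (L : List Int) : List Int :=
  (L.reverse.foldl pvStep ([], none)).1.reverse

-- ===== PRECONDITION & SPEC =====
def Spec_DescendingSortUnique (L : List Int) (out : List Int) : Prop := out = DescendingSortUnique_alt L
instance (L : List Int) (out : List Int) : Decidable (Spec_DescendingSortUnique L out) := by unfold Spec_DescendingSortUnique; infer_instance

-- ===== CLAIM (what is proved, stated in full; the proofs are below) =====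
def Claim_equal_DescendingSortUnique : Prop := ∀ (L : List Int), Dom_DescendingSortUnique L → Spec_DescendingSortUnique L (DescendingSortUnique L)

-- ===== LEMMAS AND PROOFS =====

theorem pvIsMember_iff (x : Int) (l : List Int) : pvIsMember x l = true ↔ x ∈ l := by
  induction l with
  | nil => simp [pvIsMember]
  | cons y ys ih => by_cases h : x = y <;> simp [pvIsMember, h, ih]

theorem pvMaxList_cons (x : Int) (xs : List Int) (h : xs ≠ []) :
    pvMaxList (x :: xs) = pvMax x (pvMaxList xs) := by
  cases xs with
  | nil => exact absurd rfl h
  | cons y ys => rfl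

theorem le_pvMaxList {y : Int} {xs : List Int} (h : y ∈ xs) : y ≤ pvMaxList xs := by
  induction xs with
  | nil => cases h
  | cons z zs ih =>
      cases zs with
      | nil => simp at h; simp [pvMaxList, h]
      | cons w ws =>
          rw [pvMaxList_cons z (w :: ws) (by simp)]
          rcases List.mem_cons.mp h with h | h
          · subst h; simp [pvMax]; split <;> omega
          · have := ih h; simp [pvMax]; split <;> omega

theorem pvMaxList_mem (xs : List Int) (h : xs ≠ []) : pvMaxList xs ∈ xs := by
  induction xs with
  | nil => exact absurd rfl h
  | cons z zs ih =>
      cases zs with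
      | nil => simp [pvMaxList]
      | cons w ws =>
          rw [pvMaxList_cons z (w :: ws) (by simp)]
          unfold pvMax
          split
          · simp
          · exact List.mem_cons_of_mem _ (ih (by simp))

-- A unfolded: keep the head iff it strictly dominates the (nonempty) tail's maximum
theorem A_cons_keep (x : Int) (xs : List Int) (h : xs = [] ∨ pvMaxList xs < x) :
    DescendingSortUnique (x :: xs) = x :: DescendingSortUnique xs := by
  cases xs with
  | nil => simp [DescendingSortUnique, pvMaxList, pvIsMember]
  | cons y ys =>
    have h : pvMaxList (y :: ys) < x := h.resolve_left (by simp)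
    have hne : (y :: ys) ≠ ([] : List Int) := by simp
    generalize (y :: ys) = xs at *
    have hm : pvMaxList (x :: xs) = x := by
      rw [pvMaxList_cons x xs hne]; simp only [pvMax, if_pos (le_of_lt h)]
    have hnotmem : pvIsMember x xs = false := by
      rw [Bool.eq_false_iff]
      intro hc
      have := le_pvMaxList ((pvIsMember_iff x xs).mp hc)
      omega
    simp [DescendingSortUnique, hm, hnotmem]

theorem A_cons_drop (x : Int) (xs : List Int) (hne : xs ≠ []) (h : x ≤ pvMaxList xs) :
    DescendingSortUnique (x :: xs) = DescendingSortUnique xs := by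
  have hm : pvMaxList (x :: xs) = pvMaxList xs := by
    rw [pvMaxList_cons x xs hne]; unfold pvMax; split <;> omega
  have hmem : pvIsMember (pvMaxList xs) xs = true :=
    (pvIsMember_iff _ _).mpr (pvMaxList_mem xs hne)
  simp [DescendingSortUnique, hm, hmem]

-- invariant of B's fold: after consuming L.reverse, the state is
-- (A L reversed, the max of L when L is nonempty)
theorem fold_invariant (L : List Int) :
    L.reverse.foldl pvStep ([], none)
      = ((DescendingSortUnique L).reverse,
         match L with | [] => none | _ :: _ => some (pvMaxList L)) := by
  induction L with
  | nil => rfl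
  | cons x xs ih =>
      have : (x :: xs).reverse = xs.reverse ++ [x] := by simp
      rw [this, List.foldl_append, ih]
      cases xs with
      | nil => simp [pvStep, DescendingSortUnique, pvIsMember, pvMaxList]
      | cons y ys =>
          by_cases h : pvMaxList (y :: ys) < x
          · have hk := A_cons_keep x (y :: ys) (Or.inr h)
            have hm : pvMaxList (x :: y :: ys) = x := by
              rw [pvMaxList_cons x (y :: ys) (by simp)]; unfold pvMax; split <;> omega
            simp [pvStep, h, hk, hm]
          · have hd := A_cons_drop x (y :: ys) (by simp) (by omega)
            have hm : pvMaxList (x :: y :: ys) = pvMaxList (y :: ys) := by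
              rw [pvMaxList_cons x (y :: ys) (by simp)]; unfold pvMax; split <;> omega
            simp [pvStep, h, hd, hm]

-- ===== VERDICT (by name: the statement is the Claim_ definition above) =====
theorem DescendingSortUnique_spec : Claim_equal_DescendingSortUnique := by
  intro L _
  unfold Spec_DescendingSortUnique DescendingSortUnique_alt
  rw [fold_invariant, List.reverse_reverse]
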